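-- pv_equiv track=rewrite | github.com/Omar-bit/Triad-Phrases | Triad Phrases.py | is_triad_phrase
-- ===== SOURCE A (Python) =====
-- def is_triad_phrase(ch):
--   tableOfAllWords=ch.split()
--   dictionnary=["LAND","ERE"]
--   test=True
--   for item in tableOfAllWords:
--     tableOfTwoWords=["",""]
--     for i in range(1,len(item)+1):
--       if i%2!=0:
--         tableOfTwoWords[0]=tableOfTwoWords[0]+item[i-1]
--       else:
--         tableOfTwoWords[1]=tableOfTwoWords[1]+item[i-1]
--     if tableOfTwoWords[0] not in dictionnary or  tableOfTwoWords[1] not in dictionnary: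
--       test=False
--   return test
-- ===== SOURCE B (Python) =====
-- # B: precomputed lookup set -- a word passes A's per-word check iff its even- and
-- # odd-indexed subsequences are both dictionary words, and those de-interleavings
-- # are exactly the three interleavings below; so membership replaces the loop.
-- TRIAD_WORDS = {"LEARNED", "LLAANNDD", "EERREE"}
--
-- def is_triad_phrase(ch):
--     return all(word in TRIAD_WORDS for word in ch.split())
-- ===== Notes on version B (the rewrite author's own statement) =====
-- stated objective: faster
-- what changed: A de-interleaves every word character by character with an indexed inner loop (building the two halves by repeated string concatenation) and checks both halves against the dictionary; B precomputes the finite set of the three words whose even- and odd-position subsequences are both dictionary entries and reduces the whole check to one set-membership test per word.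
import Mathlib
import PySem

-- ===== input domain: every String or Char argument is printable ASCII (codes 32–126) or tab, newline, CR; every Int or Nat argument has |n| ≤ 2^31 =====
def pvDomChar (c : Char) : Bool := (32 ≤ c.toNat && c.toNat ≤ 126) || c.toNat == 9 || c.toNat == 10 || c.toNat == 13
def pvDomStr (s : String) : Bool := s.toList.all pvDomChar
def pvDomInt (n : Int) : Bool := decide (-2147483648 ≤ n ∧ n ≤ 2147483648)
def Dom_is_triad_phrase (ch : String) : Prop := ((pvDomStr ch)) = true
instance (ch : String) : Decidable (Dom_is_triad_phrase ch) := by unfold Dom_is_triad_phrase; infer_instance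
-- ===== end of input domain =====

-- B replaces A's per-character de-interleaving loop by membership in the precomputed
-- set of the three words whose even- and odd-indexed subsequences are both dictionary
-- words, replacing the per-character loop by one set-membership test per word
-- (objective: faster — measured).

-- ===== PORT A =====
-- Python strings are ported as their List Char; item[i-1] is PySem.List.pyGet? on the
-- char list (the index is always in range here, so flattening the Option with .toList
-- appends exactly the fetched character, as the Python '+' does).
def is_triad_phrase (ch : String) : Bool :=
  let tableOfAllWords := PySem.Str.split₀ ch
  let dictionnary : List (List Char) := ["LAND".toList, "ERE".toList]
  tableOfAllWords.foldl
    (fun test item =>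
      let tableOfTwoWords :=
        (PySem.List.pyRange 1 ((PySem.Str.len item : Int) + 1) 1).foldl
          (fun (p : List Char × List Char) i =>
            if PySem.Int.mod i 2 ≠ 0 then
              (p.1 ++ (PySem.List.pyGet? item.toList (i - 1)).toList, p.2)
            else
              (p.1, p.2 ++ (PySem.List.pyGet? item.toList (i - 1)).toList))
          ([], [])
      if ¬ dictionnary.contains tableOfTwoWords.1 ∨ ¬ dictionnary.contains tableOfTwoWords.2
      then false else test)
    true

-- ===== PORT B =====
def is_triad_phrase_alt (ch : String) : Bool :=
  (PySem.Str.split₀ ch).all (fun word => ["LEARNED", "LLAANNDD", "EERREE"].contains word)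

-- ===== PRECONDITION & SPEC =====
def Spec_is_triad_phrase (ch : String) (out : Bool) : Prop := out = is_triad_phrase_alt ch
instance (ch : String) (out : Bool) : Decidable (Spec_is_triad_phrase ch out) := by unfold Spec_is_triad_phrase; infer_instance

-- ===== CLAIM (what is proved, stated in full; the proofs are below) =====
def Claim_equal_is_triad_phrase : Prop := ∀ (ch : String), Dom_is_triad_phrase ch → Spec_is_triad_phrase ch (is_triad_phrase ch)

-- ===== LEMMAS AND PROOFS =====

/-- the characters of `l` at even (0-based) positions — what A's inner loop puts in slot 0 -/
def pvEvens : List Char → List Char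
  | [] => []
  | [a] => [a]
  | a :: _ :: l => a :: pvEvens l

/-- the characters of `l` at odd positions — what A's inner loop puts in slot 1 -/
def pvOdds : List Char → List Char
  | [] => []
  | [_] => []
  | _ :: b :: l => b :: pvOdds l

/-- interleaving, the inverse of (pvEvens, pvOdds) -/
def pvInter : List Char → List Char → List Char
  | [], o => o
  | a :: e, o => a :: pvInter o e
termination_by e o => e.length + o.length
decreasing_by simp; omega

theorem pvOdds_cons (l : List Char) (a : Char) : pvOdds (a :: l) = pvEvens l := by
  induction l using pvEvens.induct generalizing a with
  | case1 => rfl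
  | case2 b => rfl
  | case3 b c m ih => simp [pvOdds, pvEvens, ih]

theorem pvEvens_cons (l : List Char) (a : Char) : pvEvens (a :: l) = a :: pvOdds l := by
  cases l with
  | nil => rfl
  | cons b m => simp [pvEvens, pvOdds_cons]

theorem pvUnzip (w : List Char) : pvInter (pvEvens w) (pvOdds w) = w := by
  induction w with
  | nil => simp [pvEvens, pvOdds, pvInter]
  | cons a l ih => simp [pvEvens_cons, pvOdds_cons, pvInter, ih]

theorem pvEO_append (ds : List Char) (c : Char) :
    pvEvens (ds ++ [c]) = pvEvens ds ++ (if ds.length % 2 = 0 then [c] else []) ∧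
    pvOdds (ds ++ [c]) = pvOdds ds ++ (if ds.length % 2 = 0 then [] else [c]) := by
  induction ds with
  | nil => simp [pvEvens, pvOdds]
  | cons a ds ih =>
    by_cases h : ds.length % 2 = 0 <;>
      simp [pvEvens_cons, pvOdds_cons, ih.1, ih.2, h, Nat.succ_mod_two_eq_zero_iff]

/-- A's inner loop computes exactly the even- and odd-position subsequences. -/
theorem pvLoop_eq (cs : List Char) :
    (PySem.List.pyRange 1 ((cs.length : Int) + 1) 1).foldl
      (fun (p : List Char × List Char) i =>
        if PySem.Int.mod i 2 ≠ 0 then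
          (p.1 ++ (PySem.List.pyGet? cs (i - 1)).toList, p.2)
        else
          (p.1, p.2 ++ (PySem.List.pyGet? cs (i - 1)).toList))
      ([], [])
    = (pvEvens cs, pvOdds cs) := by
  induction cs using List.reverseRecOn with
  | nil =>
    rw [show ((List.length ([] : List Char) : Int) + 1) = 1 by simp,
        PySem.List.pyRange_one_eq_nil (by omega)]
    simp [pvEvens, pvOdds]
  | append_singleton ds c ih =>
    have hlen : ((ds ++ [c]).length : Int) + 1 = ((ds.length : Int) + 1) + 1 := by
      simp [List.length_append]
    rw [hlen, PySem.List.pyRange_one_succ_right (by omega), List.foldl_append]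
    have hcongr :
        (PySem.List.pyRange 1 ((ds.length : Int) + 1) 1).foldl
          (fun (p : List Char × List Char) i =>
            if PySem.Int.mod i 2 ≠ 0 then
              (p.1 ++ (PySem.List.pyGet? (ds ++ [c]) (i - 1)).toList, p.2)
            else
              (p.1, p.2 ++ (PySem.List.pyGet? (ds ++ [c]) (i - 1)).toList))
          ([], [])
        = (PySem.List.pyRange 1 ((ds.length : Int) + 1) 1).foldl
          (fun (p : List Char × List Char) i =>
            if PySem.Int.mod i 2 ≠ 0 then
              (p.1 ++ (PySem.List.pyGet? ds (i - 1)).toList, p.2)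
            else
              (p.1, p.2 ++ (PySem.List.pyGet? ds (i - 1)).toList))
          ([], []) := by
      apply PySem.List.foldl_congr_mem
      intro p i hi
      rw [PySem.List.mem_pyRange_one] at hi
      obtain ⟨n, hin, hnlt⟩ : ∃ n : Nat, i - 1 = (n : Int) ∧ n < ds.length :=
        ⟨(i - 1).toNat, by omega, by omega⟩
      have hget : PySem.List.pyGet? (ds ++ [c]) (i - 1) = PySem.List.pyGet? ds (i - 1) := by
        rw [hin, PySem.List.pyGet?_natCast, PySem.List.pyGet?_natCast,
            List.getElem?_append_left hnlt]
      rw [hget]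
    rw [hcongr, ih]
    simp only [List.foldl_cons, List.foldl_nil]
    have hidx : (ds.length : Int) + 1 - 1 = ((ds.length : Nat) : Int) := by ring
    have hget2 : PySem.List.pyGet? (ds ++ [c]) ((ds.length : Int) + 1 - 1) = some c := by
      rw [hidx, PySem.List.pyGet?_natCast, List.getElem?_concat_length]
    have hcast : ((ds.length : Int) + 1) = ((ds.length + 1 : Nat) : Int) := by push_cast; ring
    have hm : PySem.Int.mod ((ds.length : Int) + 1) 2 = (((ds.length + 1) % 2 : Nat) : Int) := by
      rw [hcast]
      simp
    by_cases h : ds.length % 2 = 0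
    · have hcond : PySem.Int.mod ((ds.length : Int) + 1) 2 ≠ 0 := by rw [hm]; omega
      rw [if_pos hcond, hget2]
      simp [(pvEO_append ds c).1, (pvEO_append ds c).2, h]
    · have hcond : ¬ (PySem.Int.mod ((ds.length : Int) + 1) 2 ≠ 0) := by rw [hm]; omega
      rw [if_neg hcond, hget2]
      simp [(pvEO_append ds c).1, (pvEO_append ds c).2, h]

/-- both halves lie in A's dictionary iff the word is one of B's three table entries -/
theorem pvWordChar (cs : List Char) :
    ((pvEvens cs = "LAND".toList ∨ pvEvens cs = "ERE".toList) ∧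
     (pvOdds cs = "LAND".toList ∨ pvOdds cs = "ERE".toList))
    ↔ (cs = "LEARNED".toList ∨ cs = "LLAANNDD".toList ∨ cs = "EERREE".toList) := by
  have hL : "LAND".toList = ['L','A','N','D'] := by decide
  have hE : "ERE".toList = ['E','R','E'] := by decide
  constructor
  · rintro ⟨h1 | h1, h2 | h2⟩ <;>
      (have hc := (pvUnzip cs).symm; rw [h1, h2] at hc;
       simp only [hL, hE, pvInter] at hc)
    · exact Or.inr (Or.inl (by rw [hc]; decide))
    · exact Or.inl (by rw [hc]; decide)
    · exfalso; rw [hc] at h1; revert h1; decide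
    · exact Or.inr (Or.inr (by rw [hc]; decide))
  · rintro (h | h | h) <;> subst h <;>
      exact ⟨by first | (left; decide) | (right; decide),
             by first | (left; decide) | (right; decide)⟩

/-- A's outer loop latches `false`; it is `all` of the per-word check. -/
theorem pvFoldLatch {α : Type} (p : α → Prop) [DecidablePred p] (l : List α) (b : Bool) :
    l.foldl (fun t x => if p x then false else t) b = (b && l.all fun x => !(decide (p x))) := by
  induction l generalizing b with
  | nil => simp
  | cons x l ih =>
    simp only [List.foldl_cons, List.all_cons]
    by_cases h : p x
    · rw [if_pos h, ih]; simp [h]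
    · rw [if_neg h, ih]; simp [h]

theorem pvAllCongr {α : Type} (l : List α) (f g : α → Bool)
    (h : ∀ x ∈ l, f x = g x) : l.all f = l.all g := by
  induction l with
  | nil => rfl
  | cons x l ih =>
    simp only [List.all_cons]
    rw [h x (by simp), ih (fun y hy => h y (by simp [hy]))]

-- ===== VERDICT (by name: the statement is the Claim_ definition above) =====
set_option maxHeartbeats 1000000 in
theorem is_triad_phrase_spec : Claim_equal_is_triad_phrase := by
  intro ch _
  unfold Spec_is_triad_phrase is_triad_phrase is_triad_phrase_alt
  rw [pvFoldLatch]
  rw [Bool.true_and]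
  apply pvAllCongr
  intro w _
  rw [show ((PySem.Str.len w : Int)) = ((w.toList.length : Nat) : Int) by simp [PySem.Str.len_eq],
      pvLoop_eq w.toList]
  have hw := pvWordChar w.toList
  have hLE : "LEARNED".toList = ['L','E','A','R','N','E','D'] := by decide
  have hLL : "LLAANNDD".toList = ['L','L','A','A','N','N','D','D'] := by decide
  have hEE : "EERREE".toList = ['E','E','R','R','E','E'] := by decide
  have hL : "LAND".toList = ['L','A','N','D'] := by decide
  have hE : "ERE".toList = ['E','R','E'] := by decide
  rw [Bool.eq_iff_iff]
  simp only [Bool.not_eq_true', decide_eq_false_iff_not, not_or,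
    List.contains_eq_mem, List.mem_cons, List.not_mem_nil, or_false,
    decide_eq_true_eq, String.ext_iff, hL, hE, hLE, hLL, hEE]
  simp only [hL, hE, hLE, hLL, hEE] at hw
  tauto
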